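-- pv_equiv track=rewrite | github.com/ourochronos/valence | src/valence/federation/privacy.py | get_sensitive_category
-- ===== SOURCE A (Python) =====
-- SENSITIVE_DOMAIN_CATEGORIES: dict[str, frozenset[str]] = {
--     "health": frozenset([
--         "health", "medical", "mental_health", "diagnosis", "treatment",
--         "healthcare", "clinical", "therapy", "counseling", "psychiatric",
--     ]),
--     "finance": frozenset([
--         "finance", "banking", "investments", "salary", "debt",
--         "financial", "credit", "taxes", "income", "wealth",
--     ]),
--     "legal": frozenset([
--         "legal", "law", "criminal", "lawsuit", "arrest",
--         "court", "litigation", "prosecution", "conviction",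
--     ]),
--     "political": frozenset([
--         "politics", "political", "voting", "election",
--         "government", "partisan", "campaign", "ballot",
--     ]),
--     "religious": frozenset([
--         "religion", "religious", "faith", "spiritual",
--         "worship", "church", "mosque", "temple", "synagogue",
--     ]),
--     "identity": frozenset([
--         "sexuality", "sexual", "gender", "lgbtq",
--         "orientation", "identity", "transgender", "nonbinary",
--     ]),
--     "employment": frozenset([
--         "employment", "hr", "hiring", "termination",
--         "workplace", "employee", "employer", "human_resources",
--     ]),
--     "substance": frozenset([
--         "addiction", "substance", "abuse",
--         "recovery", "rehab", "dependency", "sobriety",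
--     ]),
--     "immigration": frozenset([
--         "immigration", "visa", "asylum",
--         "refugee", "citizenship", "deportation", "naturalization",
--     ]),
-- }
--
-- def get_sensitive_category(domain: str) -> str | None:
--     """Get the sensitive category for a domain if it matches.
--
--     Useful for determining what type of sensitivity applies.
--
--     Args:
--         domain: Domain name to check
--
--     Returns:
--         Category name if sensitive, None otherwise
--     """
--     domain_lower = domain.lower()
--     tokens = set()
--     for sep in ["/", "_", "-", ".", ":"]:
--         domain_lower = domain_lower.replace(sep, " ")
--     tokens.update(domain_lower.split())
--
--     for category, category_domains in SENSITIVE_DOMAIN_CATEGORIES.items():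
--         if tokens & category_domains:
--             return category
--     return None
-- ===== SOURCE B (Python) =====
-- # Sensitive categories in priority order; tokens of each category as one spaced string.
-- _CATEGORIES: list[tuple[str, str]] = [
--     ("health", "health medical mental_health diagnosis treatment"
--                " healthcare clinical therapy counseling psychiatric"),
--     ("finance", "finance banking investments salary debt"
--                 " financial credit taxes income wealth"),
--     ("legal", "legal law criminal lawsuit arrest"
--               " court litigation prosecution conviction"),
--     ("political", "politics political voting election"
--                   " government partisan campaign ballot"),
--     ("religious", "religion religious faith spiritual"
--                   " worship church mosque temple synagogue"),
--     ("identity", "sexuality sexual gender lgbtq"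
--                  " orientation identity transgender nonbinary"),
--     ("employment", "employment hr hiring termination"
--                    " workplace employee employer human_resources"),
--     ("substance", "addiction substance abuse"
--                   " recovery rehab dependency sobriety"),
--     ("immigration", "immigration visa asylum"
--                     " refugee citizenship deportation naturalization"),
-- ]
--
-- # Reverse index built once: token -> (rank of its category, category name).
-- # Tokens are unique across categories, so nothing is lost.
-- _TOKEN_INDEX: dict[str, tuple[int, str]] = {
--     tok: (rank, cat)
--     for rank, (cat, toks) in enumerate(_CATEGORIES)
--     for tok in toks.split()
-- }
--
--
-- def get_sensitive_category(domain: str) -> str | None: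
--     """Get the sensitive category for a domain if it matches.
--
--     Single character-level pass: split the domain into lowercased tokens on the
--     fly (whitespace and the separators /_-.: all delimit), look each token up in
--     the reverse index, and keep the match whose category comes earliest in
--     priority order (the original dict order, same tie-break).
--     """
--     best = None  # (rank, category) with the smallest rank seen so far
--     cur = []     # characters of the token being accumulated
--     for ch in domain:
--         ch = ch.lower()
--         if ch.isspace() or ch in "/_-.:":
--             if cur:
--                 e = _TOKEN_INDEX.get("".join(cur))
--                 if e is not None and (best is None or e[0] < best[0]):
--                     best = e
--                 cur = []
--         else:
--             cur.append(ch)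
--     if cur:
--         e = _TOKEN_INDEX.get("".join(cur))
--         if e is not None and (best is None or e[0] < best[0]):
--             best = e
--     return None if best is None else best[1]
-- ===== Notes on version B (the rewrite author's own statement) =====
-- stated objective: alternative
-- what changed: Replaces A's staged passes (lower the whole string, five whole-string separator replaces, split, then intersect the token set with each of the 9 category frozensets) by a single character-level scan that cuts lowercased tokens on the fly and looks each one up in a module-level reverse index token -> (category rank, name) built once, keeping the match of smallest rank (A's earliest-category tie-break).
import Mathlib
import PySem

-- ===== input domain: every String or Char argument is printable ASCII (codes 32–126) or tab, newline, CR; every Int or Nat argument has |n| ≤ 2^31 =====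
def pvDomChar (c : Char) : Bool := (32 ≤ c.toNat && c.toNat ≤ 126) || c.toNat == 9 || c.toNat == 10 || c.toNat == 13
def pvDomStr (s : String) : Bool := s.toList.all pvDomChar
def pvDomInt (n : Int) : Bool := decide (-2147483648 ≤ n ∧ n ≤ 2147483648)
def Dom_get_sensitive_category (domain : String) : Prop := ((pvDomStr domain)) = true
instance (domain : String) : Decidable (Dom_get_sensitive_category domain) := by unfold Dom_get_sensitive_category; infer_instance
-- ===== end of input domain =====

-- B replaces A's staged passes (lower the whole string, five full-string replaces, split,
-- then intersect the token set with each of the 9 category frozensets) by ONE character-level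
-- pass that cuts tokens on the fly and looks each one up in a reverse index built once
-- (token -> (category rank, category name)), keeping the match of smallest rank; objective: alternative.

-- ===== PORT A =====
-- SENSITIVE_DOMAIN_CATEGORIES as an ordered list of (category, domain-token list)
def pvCats : List (String × List String) := [
  ("health", ["health", "medical", "mental_health", "diagnosis", "treatment", "healthcare", "clinical", "therapy", "counseling", "psychiatric"]),
  ("finance", ["finance", "banking", "investments", "salary", "debt", "financial", "credit", "taxes", "income", "wealth"]),
  ("legal", ["legal", "law", "criminal", "lawsuit", "arrest", "court", "litigation", "prosecution", "conviction"]),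
  ("political", ["politics", "political", "voting", "election", "government", "partisan", "campaign", "ballot"]),
  ("religious", ["religion", "religious", "faith", "spiritual", "worship", "church", "mosque", "temple", "synagogue"]),
  ("identity", ["sexuality", "sexual", "gender", "lgbtq", "orientation", "identity", "transgender", "nonbinary"]),
  ("employment", ["employment", "hr", "hiring", "termination", "workplace", "employee", "employer", "human_resources"]),
  ("substance", ["addiction", "substance", "abuse", "recovery", "rehab", "dependency", "sobriety"]),
  ("immigration", ["immigration", "visa", "asylum", "refugee", "citizenship", "deportation", "naturalization"])]

-- A's tokenization: lower the string, replace the five separators by ' ', split()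
def pvTokenize (domain : String) : List String :=
  let dl := PySem.Str.lower domain
  let dl := ["/", "_", "-", ".", ":"].foldl (fun s sep => PySem.Str.replace s sep " ") dl
  PySem.Str.split₀ dl

-- A's loop over SENSITIVE_DOMAIN_CATEGORIES.items(): return the first category whose
-- frozenset intersects the token set ('tokens & category_domains' nonempty ↔ some token is in the list)
def pvFirstHit : List (String × List String) → List String → Option String
  | [], _ => none
  | (cat, doms) :: rest, toks =>
      if toks.any (fun t => doms.contains t) then some cat else pvFirstHit rest toks

def get_sensitive_category (domain : String) : Option String :=
  let tokens : PySem.Set String := PySem.Set.ofList (pvTokenize domain)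
  pvFirstHit pvCats tokens

-- ===== PORT B =====
-- the five separator characters of "/_-.:"
def pvSeps : List Char := ['/', '_', '-', '.', ':']

-- Source B's _CATEGORIES: categories in priority order, each with its tokens as one spaced string
def pvCatsB : List (String × String) := [
  ("health", "health medical mental_health diagnosis treatment healthcare clinical therapy counseling psychiatric"),
  ("finance", "finance banking investments salary debt financial credit taxes income wealth"),
  ("legal", "legal law criminal lawsuit arrest court litigation prosecution conviction"),
  ("political", "politics political voting election government partisan campaign ballot"),
  ("religious", "religion religious faith spiritual worship church mosque temple synagogue"),
  ("identity", "sexuality sexual gender lgbtq orientation identity transgender nonbinary"),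
  ("employment", "employment hr hiring termination workplace employee employer human_resources"),
  ("substance", "addiction substance abuse recovery rehab dependency sobriety"),
  ("immigration", "immigration visa asylum refugee citizenship deportation naturalization")]

-- Source B's _TOKEN_INDEX comprehension: nested loops over enumerate(_CATEGORIES) producing
-- token -> (rank, cat); keys are the tokens' character lists ("".join(cur) compares by content)
def pvMkIdx : Nat → List (String × String) → List (List Char × (Nat × String))
  | _, [] => []
  | r, (cat, toks) :: rest =>
      (PySem.Str.split₀ toks).map (fun t => (t.toList, (r, cat))) ++ pvMkIdx (r + 1) rest

-- tokens are unique across categories, so the dict has no overwrites and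
-- .get is first-match lookup on this very pair list
def pvIndex : List (List Char × (Nat × String)) := pvMkIdx 0 pvCatsB

def pvIdxGet? : List (List Char × (Nat × String)) → List Char → Option (Nat × String)
  | [], _ => none
  | (t, e) :: rest, w => if t = w then some e else pvIdxGet? rest w

-- the duplicated flush block of Source B: look the finished token up, keep it if its rank is strictly smaller
def pvUpdate (best : Option (Nat × String)) (cur : List Char) : Option (Nat × String) :=
  match pvIdxGet? pvIndex cur with
  | none => best
  | some e =>
      match best with
      | none => some e
      | some b => if e.1 < b.1 then some e else best

-- Source B's loop body: lowercase the character (exact for single-char ASCII lower, which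
-- PySem.Chars.lowerChar is), flush the pending token on a delimiter, else accumulate
def pvStep (st : List Char × Option (Nat × String)) (ch : Char) :
    List Char × Option (Nat × String) :=
  let lc := PySem.Chars.lowerChar ch
  if PySem.Chars.isspace lc || pvSeps.contains lc then
    if st.1 = [] then st else ([], pvUpdate st.2 st.1)
  else (st.1 ++ [lc], st.2)

-- the trailing 'if cur:' flush after the loop
def pvFinish (st : List Char × Option (Nat × String)) : Option (Nat × String) :=
  if st.1 = [] then st.2 else pvUpdate st.2 st.1

def get_sensitive_category_alt (domain : String) : Option String :=
  (pvFinish (domain.toList.foldl pvStep ([], none))).map (·.2)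

-- ===== PRECONDITION & SPEC =====
def Spec_get_sensitive_category (domain : String) (out : Option String) : Prop := out = get_sensitive_category_alt domain
instance (domain : String) (out : Option String) : Decidable (Spec_get_sensitive_category domain out) := by unfold Spec_get_sensitive_category; infer_instance

-- ===== CLAIM (what is proved, stated in full; the proofs are below) =====
def Claim_equal_get_sensitive_category : Prop := ∀ (domain : String), Dom_get_sensitive_category domain → Spec_get_sensitive_category domain (get_sensitive_category domain)

-- ===== LEMMAS AND PROOFS =====

-- the per-character effect of A's lower + five single-character replaces
def pvG (c : Char) : Char :=
  let lc := PySem.Chars.lowerChar c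
  if pvSeps.contains lc then ' ' else lc

-- specification tokenizer: str.split() as a left-to-right scan with a pending token
def pvToks : List Char → List Char → List (List Char)
  | [], cur => if cur = [] then [] else [cur]
  | c :: rest, cur =>
      if PySem.Chars.isspace c then
        (if cur = [] then pvToks rest [] else cur :: pvToks rest [])
      else pvToks rest (cur ++ [c])

-- least category index (and name) whose token list contains the word w
def pvLk : List (String × List String) → List Char → Option (Nat × String)
  | [], _ => none
  | (cat, doms) :: rest, w =>
      if doms.any (fun d => d.toList == w) then some (0, cat)
      else (pvLk rest w).map (fun e => (e.1 + 1, e.2))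

-- least category index (and name) hit by any word of ws
def pvMm : List (String × List String) → List (List Char) → Option (Nat × String)
  | [], _ => none
  | (cat, doms) :: rest, ws =>
      if ws.any (fun w => doms.any (fun d => d.toList == w)) then some (0, cat)
      else (pvMm rest ws).map (fun e => (e.1 + 1, e.2))

-- left-biased minimum-rank combination
def pvComb : Option (Nat × String) → Option (Nat × String) → Option (Nat × String)
  | none, m => m
  | some b, none => some b
  | some b, some m => if b.1 ≤ m.1 then some b else some m

-- pvUpdate with the lookup abstracted out
def pvUpd (best : Option (Nat × String)) : Option (Nat × String) → Option (Nat × String)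
  | none => best
  | some e =>
      match best with
      | none => some e
      | some b => if e.1 < b.1 then some e else best

-- ---- split₀ is the scanning tokenizer ----

theorem split₀_go_eq' :
    ∀ (s : List Char) (cur : List Char) (acc : List (List Char)),
      PySem.Chars.split₀.go s cur acc = acc.reverse ++ pvToks s cur.reverse := by
  intro s
  induction s with
  | nil =>
      intro cur acc
      simp only [PySem.Chars.split₀.go, pvToks]
      by_cases h : cur = []
      · simp [h]
      · simp [h]
  | cons c rest ih =>
      intro cur acc
      simp only [PySem.Chars.split₀.go, pvToks]
      by_cases hsp : PySem.Chars.isspace c = true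
      · by_cases h : cur = []
        · simp [hsp, h, ih]
        · simp [hsp, h, ih]
      · simp [hsp, ih]

theorem split₀_eq (s : List Char) : PySem.Chars.split₀ s = pvToks s [] := by
  simpa using split₀_go_eq' s [] []

-- ---- single-character replace is a map ----
theorem replace_go_single (o n : Char) :
    ∀ (fuel : Nat) (l : List Char) (acc : List Char), l.length ≤ fuel →
      PySem.Chars.replace.go [o] [n] fuel l acc
        = acc.reverse ++ l.map (fun c => if c = o then n else c) := by
  intro fuel
  induction fuel with
  | zero =>
      intro l acc h
      have : l = [] := by cases l <;> simp_all
      subst this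
      simp [PySem.Chars.replace.go]
  | succ fuel ih =>
      intro l acc h
      cases l with
      | nil => simp [PySem.Chars.replace.go]
      | cons c t =>
          simp only [PySem.Chars.replace.go]
          have hlen : t.length ≤ fuel := by simpa using Nat.le_of_succ_le_succ h
          by_cases hc : c = o
          · have hp : [o].isPrefixOf (c :: t) = true := by simp [List.isPrefixOf, hc]
            rw [if_pos hp]
            have hd : List.drop ([o] : List Char).length (c :: t) = t := by simp
            rw [hd, ih t ([n].reverse ++ acc) hlen]
            simp [hc]
          · have hp : [o].isPrefixOf (c :: t) = false := by
              simp only [List.isPrefixOf, Bool.and_eq_false_iff]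
              exact Or.inl (by simpa using fun he => hc he.symm)
            rw [if_neg (by simp [hp])]
            rw [ih t (c :: acc) hlen]
            simp [hc]

theorem replace_single (o n : Char) (s : List Char) :
    PySem.Chars.replace s [o] [n] = s.map (fun c => if c = o then n else c) := by
  simpa using replace_go_single o n s.length s [] (le_refl _)

-- ---- A's whole tokenization, character-list side ----
theorem chain_toList (s : String) :
    ((["/", "_", "-", ".", ":"] : List String).foldl
        (fun t sep => PySem.Str.replace t sep " ") (PySem.Str.lower s)).toList
      = s.toList.map pvG := by
  simp only [List.foldl_cons, List.foldl_nil]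
  rw [PySem.Str.toList_replace, PySem.Str.toList_replace, PySem.Str.toList_replace,
      PySem.Str.toList_replace, PySem.Str.toList_replace, PySem.Str.toList_lower]
  have h1 : (" " : String).toList = [' '] := rfl
  have h2 : ("/" : String).toList = ['/'] := rfl
  have h3 : ("_" : String).toList = ['_'] := rfl
  have h4 : ("-" : String).toList = ['-'] := rfl
  have h5 : ("." : String).toList = ['.'] := rfl
  have h6 : (":" : String).toList = [':'] := rfl
  rw [h1, h2, h3, h4, h5, h6]
  rw [replace_single, replace_single, replace_single, replace_single, replace_single]
  unfold PySem.Chars.lower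
  simp only [List.map_map]
  apply List.map_congr_left
  intro c _
  simp only [Function.comp]
  unfold pvG
  by_cases h : pvSeps.contains (PySem.Chars.lowerChar c)
  · rw [if_pos h]
    simp only [pvSeps, List.contains_eq_mem, decide_eq_true_eq, List.mem_cons,
      List.not_mem_nil, or_false] at h
    rcases h with h | h | h | h | h <;> rw [h] <;> rfl
  · rw [if_neg h]
    simp only [pvSeps, List.contains_eq_mem, decide_eq_true_eq, List.mem_cons,
      List.not_mem_nil, or_false, not_or] at h
    obtain ⟨n1, n2, n3, n4, n5⟩ := h
    simp [n1, n2, n3, n4, n5]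

-- ---- A's whole tokenization, character-list side ----
theorem tokenize_eq (domain : String) :
    (pvTokenize domain).map String.toList = pvToks (domain.toList.map pvG) [] := by
  simp only [pvTokenize]
  rw [PySem.Str.split₀_map_toList, split₀_eq, chain_toList]

-- ---- the per-character branch alignment ----
theorem step_char (c : Char) :
    (PySem.Chars.isspace (PySem.Chars.lowerChar c) || pvSeps.contains (PySem.Chars.lowerChar c))
      = PySem.Chars.isspace (pvG c) := by
  unfold pvG
  by_cases h : pvSeps.contains (PySem.Chars.lowerChar c) = true
  · rw [if_pos h, h, Bool.or_true]
    have hs : PySem.Chars.isspace ' ' = true := by decide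
    rw [hs]
  · have hf : pvSeps.contains (PySem.Chars.lowerChar c) = false := by simpa using h
    rw [if_neg h, hf, Bool.or_false]

theorem pvG_of_not_space (c : Char) (h : PySem.Chars.isspace (pvG c) = false) :
    pvG c = PySem.Chars.lowerChar c := by
  unfold pvG at *
  by_cases hc : pvSeps.contains (PySem.Chars.lowerChar c)
  · rw [if_pos hc] at h
    exact absurd h (by decide)
  · rw [if_neg hc]

-- ---- B's fused scan is the fold of pvUpdate over the scanned tokens ----
theorem fold_step :
    ∀ (s : List Char) (cur : List Char) (best : Option (Nat × String)),
      pvFinish (s.foldl pvStep (cur, best))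
        = (pvToks (s.map pvG) cur).foldl pvUpdate best := by
  intro s
  induction s with
  | nil =>
      intro cur best
      simp only [List.foldl_nil, List.map_nil, pvToks, pvFinish]
      by_cases h : cur = [] <;> simp [h]
  | cons c rest ih =>
      intro cur best
      simp only [List.foldl_cons, List.map_cons, pvToks]
      by_cases hsp : PySem.Chars.isspace (pvG c) = true
      · have hcond :
            (PySem.Chars.isspace (PySem.Chars.lowerChar c)
              || pvSeps.contains (PySem.Chars.lowerChar c)) = true := by
          rw [step_char]; exact hsp
        have hstep : pvStep (cur, best) c
            = if cur = [] then (cur, best) else ([], pvUpdate best cur) := by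
          simp only [pvStep, hcond]; simp
        rw [hstep]
        by_cases h : cur = []
        · simp [hsp, h, ih]
        · simp [hsp, h, ih]
      · have hcond :
            (PySem.Chars.isspace (PySem.Chars.lowerChar c)
              || pvSeps.contains (PySem.Chars.lowerChar c)) = false := by
          rw [step_char]; simpa using hsp
        have hspf : PySem.Chars.isspace (pvG c) = false := by simpa using hsp
        have hg := pvG_of_not_space c hspf
        have hsl : PySem.Chars.isspace (PySem.Chars.lowerChar c) = false :=
          (Bool.or_eq_false_iff.mp hcond).1
        have hstep : pvStep (cur, best) c = (cur ++ [PySem.Chars.lowerChar c], best) := by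
          simp only [pvStep, hcond]; simp
        rw [hstep]
        simp [hg, hsl, ih]

-- ---- lookup in the reverse index is the least-category lookup ----
-- the same index built from A's category lists
def pvMkIdxL : Nat → List (String × List String) → List (List Char × (Nat × String))
  | _, [] => []
  | r, (cat, toks) :: rest => toks.map (fun t => (t.toList, (r, cat))) ++ pvMkIdxL (r + 1) rest

-- B's index (built by splitting the spaced token strings) is that very list
set_option maxRecDepth 4096 in
theorem index_eq : pvIndex = pvMkIdxL 0 pvCats := by decide

theorem idx_block (w : List Char) (cat : String) (r : Nat) (doms : List String)
    (tail : List (List Char × (Nat × String))) :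
    pvIdxGet? (doms.map (fun t => (t.toList, (r, cat))) ++ tail) w
      = if doms.any (fun d => d.toList == w) then some (r, cat) else pvIdxGet? tail w := by
  induction doms with
  | nil => simp
  | cons d ds ihd =>
      simp only [List.map_cons, List.cons_append, pvIdxGet?, List.any_cons]
      by_cases he : d.toList = w
      · simp [he]
      · have hb : (d.toList == w) = false := by simpa using he
        simp [he, hb, ihd]

theorem idx_lookup (w : List Char) :
    ∀ (cats : List (String × List String)) (r : Nat),
      pvIdxGet? (pvMkIdxL r cats) w = (pvLk cats w).map (fun e => (e.1 + r, e.2)) := by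
  intro cats
  induction cats with
  | nil => intro r; rfl
  | cons c rest ih =>
      intro r
      obtain ⟨cat, doms⟩ := c
      simp only [pvMkIdxL, pvLk, idx_block]
      by_cases h : (doms.any fun d => d.toList == w) = true
      · rw [if_pos h, if_pos h]; simp
      · rw [if_neg h, if_neg h, ih (r + 1)]
        cases pvLk rest w <;> simp [Nat.add_assoc, Nat.add_comm 1 r]

theorem pvUpdate_eq (best : Option (Nat × String)) (w : List Char) :
    pvUpdate best w = pvUpd best (pvLk pvCats w) := by
  unfold pvUpdate pvUpd
  rw [index_eq, idx_lookup]
  cases pvLk pvCats w <;> rfl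

-- ---- pvMm structure ----
theorem pvMm_nil : ∀ cats : List (String × List String), pvMm cats [] = none := by
  intro cats
  induction cats with
  | nil => rfl
  | cons c rest ih => obtain ⟨cat, doms⟩ := c; simp [pvMm, ih]

theorem pvComb_shift (a b : Option (Nat × String)) :
    pvComb (a.map fun e => (e.1 + 1, e.2)) (b.map fun e => (e.1 + 1, e.2))
      = (pvComb a b).map fun e => (e.1 + 1, e.2) := by
  cases a with
  | none => cases b <;> rfl
  | some e =>
      cases b with
      | none => rfl
      | some b' =>
          simp only [Option.map_some, pvComb, Nat.add_le_add_iff_right]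
          split <;> rfl

theorem pvMm_cons (w : List Char) (ws : List (List Char)) :
    ∀ cats : List (String × List String),
      pvMm cats (w :: ws) = pvComb (pvLk cats w) (pvMm cats ws) := by
  intro cats
  induction cats with
  | nil => rfl
  | cons c rest ih =>
      obtain ⟨cat, doms⟩ := c
      simp only [pvMm, pvLk, List.any_cons]
      by_cases hpt : (doms.any fun d => d.toList == w) = true
      · rw [if_pos (by simp [hpt]), if_pos hpt]
        cases (if (ws.any fun w => doms.any fun d => d.toList == w) = true then some ((0 : Nat), cat)
            else (pvMm rest ws).map fun e => (e.1 + 1, e.2)) <;> simp [pvComb]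
      · have hpf : (doms.any fun d => d.toList == w) = false := by
          simp only [Bool.not_eq_true] at hpt; exact hpt
        simp only [hpf, Bool.false_or, Bool.false_eq_true, if_false]
        by_cases hts : (ws.any fun w => doms.any fun d => d.toList == w) = true
        · rw [if_pos hts, if_pos hts]
          cases pvLk rest w <;> simp [pvComb]
        · rw [if_neg hts, if_neg hts, ih, pvComb_shift]

-- ---- the fold of strict-< updates computes the left-biased minimum ----
theorem upd_comb_assoc (B L M : Option (Nat × String)) :
    pvComb (pvUpd B L) M = pvComb B (pvComb L M) := by
  cases L with
  | none => cases B <;> rfl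
  | some e =>
      cases B with
      | none => cases M <;> rfl
      | some b =>
          cases M with
          | none =>
              simp only [pvUpd]
              by_cases h1 : e.1 < b.1
              · rw [if_pos h1]; simp [pvComb, show ¬ b.1 ≤ e.1 by omega]
              · rw [if_neg h1]; simp [pvComb, show b.1 ≤ e.1 by omega]
          | some m =>
              simp only [pvUpd]
              by_cases h1 : e.1 < b.1
              · rw [if_pos h1]
                by_cases h2 : e.1 ≤ m.1
                · simp [pvComb, h2, show ¬ b.1 ≤ e.1 by omega]
                · simp [pvComb, h2, show ¬ b.1 ≤ m.1 by omega]
              · rw [if_neg h1]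
                by_cases h2 : e.1 ≤ m.1
                · simp [pvComb, h2, show b.1 ≤ e.1 by omega, show b.1 ≤ m.1 by omega]
                · simp [pvComb, h2]

theorem fold_upd (ws : List (List Char)) :
    ∀ best : Option (Nat × String),
      ws.foldl pvUpdate best = pvComb best (pvMm pvCats ws) := by
  induction ws with
  | nil => intro best; rw [pvMm_nil]; cases best <;> rfl
  | cons w ws ih =>
      intro best
      rw [List.foldl_cons, ih, pvMm_cons, pvUpdate_eq, upd_comb_assoc]

-- ---- A's first-hit scan is the minimum over the same words ----
theorem pvA_main (S : List String) (ws : List (List Char))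
    (h : ∀ doms : List String,
      (S.any fun t => doms.contains t) = (ws.any fun w => doms.any fun d => d.toList == w)) :
    ∀ cats : List (String × List String),
      pvFirstHit cats S = (pvMm cats ws).map (·.2) := by
  intro cats
  induction cats with
  | nil => rfl
  | cons c rest ih =>
      obtain ⟨cat, doms⟩ := c
      simp only [pvFirstHit, pvMm, h doms]
      by_cases hts : (ws.any fun w => doms.any fun d => d.toList == w) = true
      · rw [if_pos hts, if_pos hts]; rfl
      · rw [if_neg hts, if_neg hts, ih]
        cases pvMm rest ws <;> rfl

-- the token set and the token word list hit exactly the same category token lists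
theorem set_words (ts : List String) (doms : List String) :
    ((PySem.Set.ofList ts : List String).any fun t => doms.contains t)
      = ((ts.map String.toList).any fun w => doms.any fun d => d.toList == w) := by
  rw [Bool.eq_iff_iff]
  simp only [List.any_eq_true, List.any_map, Function.comp, List.contains_eq_mem,
    decide_eq_true_eq, beq_iff_eq]
  constructor
  · rintro ⟨t, ht, hc⟩
    exact ⟨t, (PySem.Set.mem_ofList ts t).mp ht, t, hc, rfl⟩
  · rintro ⟨t, ht, d, hd, hdt⟩
    exact ⟨t, (PySem.Set.mem_ofList ts t).mpr ht, String.toList_inj.mp hdt ▸ hd⟩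

-- ===== VERDICT (by name: the statement is the Claim_ definition above) =====
theorem get_sensitive_category_spec : Claim_equal_get_sensitive_category := by
  intro domain _
  unfold Spec_get_sensitive_category get_sensitive_category get_sensitive_category_alt
  rw [fold_step, ← tokenize_eq, fold_upd]
  rw [pvA_main (PySem.Set.ofList (pvTokenize domain)) ((pvTokenize domain).map String.toList)
      (set_words (pvTokenize domain)) pvCats]
  cases pvMm pvCats ((pvTokenize domain).map String.toList) <;> rfl
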